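-- pv_equiv track=rewrite | github.com/Andy46/adventofcode | 2024/09_DiskFragmenter/main.py | findEmptySpaces
-- ===== SOURCE A (Python) =====
-- def findEmptySpaces(disk):
--     spaces = []
--     index = 0
--     while index < len(disk):
--         if None not in disk[index:]:
--             break
--         firstEmpty = index + disk[index:].index(None)
--         index = firstEmpty
--         while index < len(disk) and disk[index] is None:
--             index = index + 1
--         emptySpace = [firstEmpty, index - firstEmpty] # Position of empty space and size
--         spaces.append(emptySpace)
--     return spaces
-- ===== SOURCE B (Python) =====
-- def findEmptySpaces(disk):
--     # Single linear pass tracking the start of the current None-run (O(n) vs A's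
--     # repeated slicing/index scans).
--     spaces = []
--     start = None
--     for i, x in enumerate(disk):
--         if x is None:
--             if start is None:
--                 start = i
--         elif start is not None:
--             spaces.append([start, i - start])
--             start = None
--     if start is not None:
--         spaces.append([start, len(disk) - start])
--     return spaces
-- ===== Notes on version B (the rewrite author's own statement) =====
-- stated objective: faster
-- what changed: Replaces A's outer while loop that repeatedly slices the list and rescans it with `in`/`.index` by one linear enumerate pass that tracks the start of the current None-run and emits [start, length] when the run closes.
import Mathlib
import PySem

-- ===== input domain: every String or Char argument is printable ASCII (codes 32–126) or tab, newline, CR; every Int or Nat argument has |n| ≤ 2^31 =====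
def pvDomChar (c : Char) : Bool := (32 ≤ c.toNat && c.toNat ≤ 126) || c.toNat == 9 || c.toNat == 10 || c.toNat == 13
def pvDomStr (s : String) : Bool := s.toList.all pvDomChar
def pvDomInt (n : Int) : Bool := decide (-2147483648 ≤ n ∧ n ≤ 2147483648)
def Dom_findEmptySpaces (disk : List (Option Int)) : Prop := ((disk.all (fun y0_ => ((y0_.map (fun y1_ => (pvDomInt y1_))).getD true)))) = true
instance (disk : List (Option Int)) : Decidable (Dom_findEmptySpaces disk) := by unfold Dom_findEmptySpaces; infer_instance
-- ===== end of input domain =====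

-- B replaces A's outer loop of repeated slice/`in`/`.index` rescans by one linear
-- enumerate pass tracking the start of the current None-run (asymptotically faster).

-- ===== PORT A =====
-- inner `while index < len(disk) and disk[index] is None: index += 1`
def pvSkip (disk : List (Option Int)) (i : Nat) : Nat :=
  if h : i < disk.length ∧ disk[i]? = some none then pvSkip disk (i + 1) else i
termination_by disk.length - i
decreasing_by omega

theorem pvSkip_ge (disk : List (Option Int)) (i : Nat) : i ≤ pvSkip disk i := by
  rw [pvSkip]
  split
  · have := pvSkip_ge disk (i + 1); omega
  · omega
termination_by disk.length - i
decreasing_by rename_i h; omega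

theorem pvSkip_gt (disk : List (Option Int)) (i : Nat)
    (h1 : i < disk.length) (h2 : disk[i]? = some none) : i < pvSkip disk i := by
  rw [pvSkip]
  rw [dif_pos ⟨h1, h2⟩]
  have := pvSkip_ge disk (i + 1); omega

-- outer while loop of A; `disk[index:]` is `disk.drop i` (PySem.List.slice_from_natCast),
-- and the `None not in …` test / `.index(None)` pair is the match on PySem.List.index?
def pvLoop (disk : List (Option Int)) (i : Nat) : List (List Int) :=
  if _h : i < disk.length then
    match hm : PySem.List.index? (disk.drop i) (none : Option Int) with
    | none => []
    | some k =>
      let firstEmpty := i + k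
      let j := pvSkip disk firstEmpty
      [(firstEmpty : Int), (j : Int) - (firstEmpty : Int)] :: pvLoop disk j
  else []
termination_by disk.length - i
decreasing_by
  have h := PySem.List.getElem_of_index?_eq_some hm
  obtain ⟨hk, hv, -⟩ := h
  have hlen : i + k < disk.length := by
    have := List.length_drop (l := disk) (i := i); omega
  have hg : disk[i + k]? = some none := by
    have : (disk.drop i)[k] = disk[i + k] := List.getElem_drop ..
    rw [List.getElem?_eq_getElem hlen, ← this, hv]
  have := pvSkip_gt disk (i + k) hlen hg
  omega

def findEmptySpaces (disk : List (Option Int)) : List (List Int) :=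
  pvLoop disk 0

-- ===== PORT B =====
-- one step of the `for i, x in enumerate(disk)` loop; state = (spaces, start)
def pvStep (st : List (List Int) × Option Int) (ix : Int × Option Int) :
    List (List Int) × Option Int :=
  match ix.2 with
  | none =>
    match st.2 with
    | none => (st.1, some ix.1)
    | some _ => st
  | some _ =>
    match st.2 with
    | none => st
    | some s => (st.1 ++ [[s, ix.1 - s]], none)

def findEmptySpaces_alt (disk : List (Option Int)) : List (List Int) :=
  let r := (PySem.List.enumerate disk 0).foldl pvStep ([], none)
  match r.2 with
  | none => r.1
  | some s => r.1 ++ [[s, (disk.length : Int) - s]]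

-- ===== PRECONDITION & SPEC =====
def Spec_findEmptySpaces (disk : List (Option Int)) (out : List (List Int)) : Prop := out = findEmptySpaces_alt disk
instance (disk : List (Option Int)) (out : List (List Int)) : Decidable (Spec_findEmptySpaces disk out) := by unfold Spec_findEmptySpaces; infer_instance

-- ===== CLAIM (what is proved, stated in full; the proofs are below) =====
def Claim_equal_findEmptySpaces : Prop := ∀ (disk : List (Option Int)), Dom_findEmptySpaces disk → Spec_findEmptySpaces disk (findEmptySpaces disk)

-- ===== LEMMAS AND PROOFS =====

-- reference function: the None-runs of l, positions offset by n, current open run start st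
def pvRuns : List (Option Int) → Int → Option Int → List (List Int)
  | [], _, none => []
  | [], n, some s => [[s, n - s]]
  | none :: xs, n, none => pvRuns xs (n + 1) (some n)
  | none :: xs, n, some s => pvRuns xs (n + 1) (some s)
  | some _ :: xs, n, none => pvRuns xs (n + 1) none
  | some _ :: xs, n, some s => [s, n - s] :: pvRuns xs (n + 1) none

def pvFinish : List (List Int) × Option Int → Int → List (List Int)
  | (sp, none), _ => sp
  | (sp, some s), m => sp ++ [[s, m - s]]

theorem foldB (l : List (Option Int)) : ∀ (n : Int) (acc : List (List Int)) (st : Option Int),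
    pvFinish ((PySem.List.enumerate l n).foldl pvStep (acc, st)) (n + l.length) = acc ++ pvRuns l n st := by
  induction l with
  | nil =>
    intro n acc st
    cases st <;> simp [PySem.List.enumerate, pvFinish, pvRuns]
  | cons x xs ih =>
    intro n acc st
    rw [PySem.List.enumerate_cons]
    have hlen : n + ((x :: xs).length : Int) = (n + 1) + (xs.length : Int) := by
      simp only [List.length_cons]; push_cast; ring
    cases x <;> cases st <;>
      simp only [List.foldl_cons, pvStep, pvRuns, hlen, ih, List.append_assoc, List.singleton_append]

theorem S1 (l : List (Option Int)) : ∀ (n : Int), (none : Option Int) ∉ l → pvRuns l n none = [] := by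
  induction l with
  | nil => intro n _; rfl
  | cons x xs ih =>
    intro n h
    cases x with
    | none => simp at h
    | some v =>
      rw [pvRuns]
      exact ih (n + 1) (by simp at h; exact h)

theorem S2 (pre : List (Option Int)) : ∀ (t : List (Option Int)) (n : Int),
    (none : Option Int) ∉ pre → pvRuns (pre ++ t) n none = pvRuns t (n + pre.length) none := by
  induction pre with
  | nil => intro t n _; simp
  | cons x xs ih =>
    intro t n h
    cases x with
    | none => simp at h
    | some v =>
      rw [List.cons_append, pvRuns, ih t (n + 1) (by simp at h; exact h)]
      congr 1
      simp only [List.length_cons]; push_cast; ring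

theorem S3 (disk : List (Option Int)) (p : Nat) (t : Int) :
    pvRuns (disk.drop p) p (some t)
      = [t, (pvSkip disk p : Int) - t] :: pvRuns (disk.drop (pvSkip disk p)) (pvSkip disk p) none := by
  by_cases hp : p < disk.length
  · have hdrop : disk.drop p = disk[p] :: disk.drop (p + 1) := List.drop_eq_getElem_cons hp
    cases hx : disk[p] with
    | none =>
      have hskip : pvSkip disk p = pvSkip disk (p + 1) := by
        rw [pvSkip, dif_pos ⟨hp, by rw [List.getElem?_eq_getElem hp, hx]⟩]
      have ih := S3 disk (p + 1) t
      rw [hdrop, hx, pvRuns, hskip]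
      have : (p : Int) + 1 = ((p + 1 : Nat) : Int) := by push_cast; ring
      rw [this, ih]
    | some v =>
      have hskip : pvSkip disk p = p := by
        rw [pvSkip]
        rw [dif_neg (by rw [List.getElem?_eq_getElem hp, hx]; simp)]
      rw [hskip, hdrop, hx]
      simp only [pvRuns]
  · have hd : disk.drop p = [] := List.drop_eq_nil_of_le (by omega)
    have hskip : pvSkip disk p = p := by
      rw [pvSkip, dif_neg (by intro h; exact hp h.1)]
    rw [hd, hskip, hd, pvRuns, pvRuns]
termination_by disk.length - p
decreasing_by omega

theorem runsA (disk : List (Option Int)) (i : Nat) :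
    pvLoop disk i = pvRuns (disk.drop i) i none := by
  by_cases hp : i < disk.length
  · rw [pvLoop, dif_pos hp]
    cases hm : PySem.List.index? (disk.drop i) (none : Option Int) with
    | none =>
      rw [S1 _ _ (by rw [← PySem.List.index?_eq_none_iff]; exact hm)]
    | some k =>
      simp only
      obtain ⟨pre, suf, hsplit, hplen, hnpre⟩ := (PySem.List.index?_eq_some_iff _ _ _).mp hm
      have hdk : disk.drop (i + k) = none :: suf := by
        have h2 : (disk.drop i).drop k = disk.drop (i + k) := List.drop_drop ..
        rw [← h2, hsplit, ← hplen, List.drop_left]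
      have hcast : ((i + k : Nat) : Int) = (i : Int) + k := by push_cast; ring
      have hrw : pvRuns (disk.drop i) i none = pvRuns (disk.drop (i + k)) ((i + k : Nat) : Int) (some ((i : Int) + k)) := by
        rw [hcast, hsplit, S2 pre _ _ hnpre, hplen, hdk]
        simp only [pvRuns]
      have hmem : i + k < disk.length := by
        have : (disk.drop i).length = disk.length - i := List.length_drop ..
        have hk : k < (disk.drop i).length := by
          rw [hsplit, ← hplen]; simp
        omega
      have hgt : i < pvSkip disk (i + k) := by
        have := pvSkip_gt disk (i + k) hmem (by
          rw [List.getElem?_eq_getElem hmem]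
          have h1 : disk[i + k] :: disk.drop (i+k+1) = disk.drop (i + k) := (List.drop_eq_getElem_cons hmem).symm
          rw [hdk] at h1
          exact congrArg some (List.head_eq_of_cons_eq h1))
        omega
      rw [hrw, S3 disk (i + k) ((i : Int) + k), runsA disk (pvSkip disk (i + k)), hcast]
  · rw [pvLoop, dif_neg hp, List.drop_eq_nil_of_le (by omega), pvRuns]
termination_by disk.length - i
decreasing_by omega

theorem alt_eq_runs (disk : List (Option Int)) : findEmptySpaces_alt disk = pvRuns disk 0 none := by
  have h := foldB disk 0 [] none
  rw [zero_add, List.nil_append] at h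
  rw [← h]
  unfold findEmptySpaces_alt pvFinish
  rcases (PySem.List.enumerate disk 0).foldl pvStep ([], none) with ⟨sp, _ | s⟩ <;> simp

-- ===== VERDICT (by name: the statement is the Claim_ definition above) =====
theorem findEmptySpaces_spec : Claim_equal_findEmptySpaces := by
  intro disk _
  unfold Spec_findEmptySpaces findEmptySpaces
  rw [runsA disk 0, alt_eq_runs, List.drop_zero]
  norm_num
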